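-- pv_equiv track=rewrite | github.com/chuanjr/superpowers | job-aggregator/application_generator.py | _inject_skills_keywords
-- ===== SOURCE A (Python) =====
-- def _inject_skills_keywords(rest_block: str, missing_keywords: list[str]) -> str:
--     """Add missing JD keywords to the Skills section of rest_block (verbatim sections).
--
--     Per the Resume Judgment Framework: ATS keywords belong in the Skills section,
--     NOT forced into bullets. Skills section keyword weight is comparable for ATS purposes.
--     Only adds keywords that Grace plausibly has (filters fabrication-risky keywords like
--     "Agile/Scrum", "growth hacking", "behavioral science" as a formal methodology).
--
--     Returns updated rest_block.
--     """
--     if not missing_keywords or not rest_block: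
--         return rest_block
--
--     # Keywords that should never be added (fabrication risk or outdated/buzzword)
--     _reject_keywords = {
--         "agile", "scrum", "growth hacking", "behavioral science",
--         "leveraged synergies", "growth hacking",
--     }
--
--     safe_keywords = [
--         k for k in missing_keywords
--         if not any(bad in k.lower() for bad in _reject_keywords)
--     ]
--     if not safe_keywords:
--         return rest_block
--
--     lines = rest_block.split("\n")
--     result_lines = []
--     in_skills = False
--     skills_updated = False
--
--     for i, line in enumerate(lines):
--         stripped = line.strip()
--         # Detect skills section header
--         if stripped.startswith("#") and any(
--             kw in stripped.lower() for kw in ("skill", "technical", "tools", "core competenc")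
--         ):
--             in_skills = True
--             result_lines.append(line)
--             continue
--
--         # Detect next section header (end of skills)
--         if in_skills and stripped.startswith("#") and not any(
--             kw in stripped.lower() for kw in ("skill", "technical", "tools", "core competenc")
--         ):
--             in_skills = False
--             # Inject keywords before this section header if not yet done
--             if not skills_updated and safe_keywords:
--                 result_lines.append("- " + ", ".join(safe_keywords))
--                 skills_updated = True
--
--         result_lines.append(line)
--
--         # If still in skills and this is the last line of the block, inject after
--         if in_skills and not skills_updated and i == len(lines) - 1:
--             result_lines.append("- " + ", ".join(safe_keywords))
--             skills_updated = True
--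
--     # If skills section found but keywords not yet added (no subsequent header)
--     if in_skills and not skills_updated and safe_keywords:
--         result_lines.append("- " + ", ".join(safe_keywords))
--
--     return "\n".join(result_lines)
-- ===== SOURCE B (Python) =====
-- def _inject_skills_keywords(rest_block: str, missing_keywords: list[str]) -> str:
--     """Insert missing keywords as one bullet line at the end of the Skills section.
--
--     Same filtering as the original; the insertion point is computed by index
--     scanning instead of a stateful line-by-line rebuild.
--     """
--     if not missing_keywords or not rest_block:
--         return rest_block
--
--     _reject_keywords = {
--         "agile", "scrum", "growth hacking", "behavioral science",
--         "leveraged synergies", "growth hacking",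
--     }
--     safe_keywords = [
--         k for k in missing_keywords
--         if not any(bad in k.lower() for bad in _reject_keywords)
--     ]
--     if not safe_keywords:
--         return rest_block
--
--     _skills_words = ("skill", "technical", "tools", "core competenc")
--
--     def _is_skills_header(line: str) -> bool:
--         s = line.strip()
--         return s.startswith("#") and any(w in s.lower() for w in _skills_words)
--
--     def _is_other_header(line: str) -> bool:
--         s = line.strip()
--         return s.startswith("#") and not any(w in s.lower() for w in _skills_words)
--
--     lines = rest_block.split("\n")
--     start = next((i for i, l in enumerate(lines) if _is_skills_header(l)), None)
--     if start is None:
--         return "\n".join(lines)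
--
--     pos = next((j for j in range(start + 1, len(lines)) if _is_other_header(lines[j])),
--                len(lines))
--     bullet = "- " + ", ".join(safe_keywords)
--     return "\n".join(lines[:pos] + [bullet] + lines[pos:])
-- ===== Notes on version B (the rewrite author's own statement) =====
-- stated objective: simpler
-- what changed: Replaces A's stateful line-by-line rebuild (in_skills/skills_updated flags, three injection sites) by computing the single insertion index — the first non-skills '#' header after the first skills header, or end of block — and splicing the bullet line in once.
import Mathlib
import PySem

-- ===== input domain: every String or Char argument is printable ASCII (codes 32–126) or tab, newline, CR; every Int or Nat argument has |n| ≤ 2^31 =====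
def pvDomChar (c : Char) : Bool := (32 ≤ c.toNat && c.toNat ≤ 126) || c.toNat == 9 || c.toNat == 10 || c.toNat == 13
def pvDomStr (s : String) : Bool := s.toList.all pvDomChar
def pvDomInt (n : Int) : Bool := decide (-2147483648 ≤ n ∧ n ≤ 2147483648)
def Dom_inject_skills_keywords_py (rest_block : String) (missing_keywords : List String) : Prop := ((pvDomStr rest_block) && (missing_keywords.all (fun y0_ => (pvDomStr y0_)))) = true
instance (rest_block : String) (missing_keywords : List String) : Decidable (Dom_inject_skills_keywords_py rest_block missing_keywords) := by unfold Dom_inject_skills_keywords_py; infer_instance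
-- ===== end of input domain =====

-- B replaces A's stateful line-by-line rebuild by computing the single insertion index
-- (first non-skills header after the first skills header) and splicing once (objective: simpler).

-- helpers shared by both ports (identical code in both Pythons: the reject filter and the header tests)
def pvRejectKeywords : List String :=
  ["agile", "scrum", "growth hacking", "behavioral science", "leveraged synergies", "growth hacking"]

def pvSkillWords : List String := ["skill", "technical", "tools", "core competenc"]

def pvSafeKeywords (missing_keywords : List String) : List String :=
  missing_keywords.filter
    (fun k => !(pvRejectKeywords.any (fun bad => PySem.Str.isIn bad (PySem.Str.lower k))))

-- stripped.startswith("#") and any(kw in stripped.lower() for kw in pvSkillWords)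
def pvIsSkillsHeader (l : String) : Bool :=
  PySem.Str.startswith (PySem.Str.strip l) "#" &&
    pvSkillWords.any (fun kw => PySem.Str.isIn kw (PySem.Str.lower (PySem.Str.strip l)))

-- stripped.startswith("#") and not any(kw in stripped.lower() for kw in pvSkillWords)
def pvIsOtherHeader (l : String) : Bool :=
  PySem.Str.startswith (PySem.Str.strip l) "#" &&
    !(pvSkillWords.any (fun kw => PySem.Str.isIn kw (PySem.Str.lower (PySem.Str.strip l))))

def pvBullet (safe : List String) : String := "- " ++ PySem.Str.join ", " safe

-- ===== PORT A =====
-- A's for-loop over enumerated lines with state (result_lines, in_skills, skills_updated);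
-- returns (result_lines, in_skills, skills_updated)
def pvLoopA (safe : List String) : List String → Bool → Bool → List String × Bool × Bool
  | [], ins, upd => ([], ins, upd)
  | l :: rest, ins, upd =>
    if pvIsSkillsHeader l then
      let r := pvLoopA safe rest true upd
      (l :: r.1, r.2)
    else
      let inj := ins && pvIsOtherHeader l && !upd && !safe.isEmpty
      let pre : List String := if inj then [pvBullet safe] else []
      let upd1 := inj || upd
      let ins1 := if ins && pvIsOtherHeader l then false else ins
      let last := ins1 && !upd1 && rest.isEmpty
      let post : List String := if last then [pvBullet safe] else []
      let upd2 := last || upd1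
      let r := pvLoopA safe rest ins1 upd2
      (pre ++ l :: (post ++ r.1), r.2)

def inject_skills_keywords_py (rest_block : String) (missing_keywords : List String) : String :=
  if missing_keywords.isEmpty || rest_block == "" then rest_block
  else
    let safe := pvSafeKeywords missing_keywords
    if safe.isEmpty then rest_block
    else
      let lines := (PySem.Str.split? rest_block "\n").getD []
      let r := pvLoopA safe lines false false
      let res := if r.2.1 && !r.2.2 && !safe.isEmpty then r.1 ++ [pvBullet safe] else r.1
      PySem.Str.join "\n" res

-- ===== PORT B =====
def inject_skills_keywords_py_alt (rest_block : String) (missing_keywords : List String) : String :=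
  if missing_keywords.isEmpty || rest_block == "" then rest_block
  else
    let safe := pvSafeKeywords missing_keywords
    if safe.isEmpty then rest_block
    else
      let lines := (PySem.Str.split? rest_block "\n").getD []
      match lines.findIdx? pvIsSkillsHeader with
      | none => PySem.Str.join "\n" lines
      | some i =>
        let pos := match (lines.drop (i + 1)).findIdx? pvIsOtherHeader with
          | none => lines.length
          | some k => i + 1 + k
        PySem.Str.join "\n" (lines.take pos ++ pvBullet safe :: lines.drop pos)

-- ===== PRECONDITION & SPEC =====
def Spec_inject_skills_keywords_py (rest_block : String) (missing_keywords : List String) (out : String) : Prop := out = inject_skills_keywords_py_alt rest_block missing_keywords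
instance (rest_block : String) (missing_keywords : List String) (out : String) : Decidable (Spec_inject_skills_keywords_py rest_block missing_keywords out) := by unfold Spec_inject_skills_keywords_py; infer_instance

-- ===== CLAIM (what is proved, stated in full; the proofs are below) =====
def Claim_equal_inject_skills_keywords_py : Prop := ∀ (rest_block : String) (missing_keywords : List String), Dom_inject_skills_keywords_py rest_block missing_keywords → Spec_inject_skills_keywords_py rest_block missing_keywords (inject_skills_keywords_py rest_block missing_keywords)

-- ===== LEMMAS AND PROOFS =====

lemma pvNotOther_of_skills {l : String} (h : pvIsSkillsHeader l = true) :
    pvIsOtherHeader l = false := by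
  unfold pvIsSkillsHeader at h
  unfold pvIsOtherHeader
  simp_all

lemma pvStep_skills (safe : List String) {l : String} (rest : List String) (ins upd : Bool)
    (h : pvIsSkillsHeader l = true) :
    pvLoopA safe (l :: rest) ins upd
      = (l :: (pvLoopA safe rest true upd).1, (pvLoopA safe rest true upd).2) := by
  simp [pvLoopA, h]

lemma pvStep_other (safe : List String) {l : String} (rest : List String)
    (hP : pvIsSkillsHeader l = false) (hO : pvIsOtherHeader l = true)
    (hs : safe.isEmpty = false) :
    pvLoopA safe (l :: rest) true false
      = (pvBullet safe :: l :: (pvLoopA safe rest false true).1,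
         (pvLoopA safe rest false true).2) := by
  simp [pvLoopA, hP, hO, hs]

lemma pvStep_plain (safe : List String) {l : String} (rest : List String) (ins upd : Bool)
    (hP : pvIsSkillsHeader l = false) (hO : pvIsOtherHeader l = false) :
    pvLoopA safe (l :: rest) ins upd
      = (l :: ((if ins && !upd && rest.isEmpty then [pvBullet safe] else []) ++
            (pvLoopA safe rest ins ((ins && !upd && rest.isEmpty) || upd)).1),
         (pvLoopA safe rest ins ((ins && !upd && rest.isEmpty) || upd)).2) := by
  simp [pvLoopA, hP, hO]

lemma pvLoopA_pass (safe : List String) : ∀ (ls : List String) (ins : Bool),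
    (pvLoopA safe ls ins true).1 = ls ∧ (pvLoopA safe ls ins true).2.2 = true := by
  intro ls
  induction ls with
  | nil => intro ins; simp [pvLoopA]
  | cons l rest ih =>
    intro ins
    by_cases h : pvIsSkillsHeader l = true
    · simp [pvStep_skills safe rest ins true h, ih true]
    · simp only [Bool.not_eq_true] at h
      simp [pvLoopA, h, ih]

lemma pvLoopA_skills (safe : List String) (hs : safe.isEmpty = false) : ∀ (ls : List String),
    (if (pvLoopA safe ls true false).2.1 && !(pvLoopA safe ls true false).2.2 && !safe.isEmpty
      then (pvLoopA safe ls true false).1 ++ [pvBullet safe]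
      else (pvLoopA safe ls true false).1)
    = match ls.findIdx? pvIsOtherHeader with
      | none => ls ++ [pvBullet safe]
      | some k => ls.take k ++ pvBullet safe :: ls.drop k := by
  intro ls
  induction ls with
  | nil => simp [pvLoopA, hs]
  | cons l rest ih =>
    by_cases hP : pvIsSkillsHeader l = true
    · have hO := pvNotOther_of_skills hP
      rw [pvStep_skills safe rest true false hP]
      simp only [List.findIdx?_cons, hO, Bool.false_eq_true, if_false]
      by_cases hc : ((pvLoopA safe rest true false).2.1
          && !(pvLoopA safe rest true false).2.2 && !safe.isEmpty) = true
      · rw [if_pos hc] at ih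
        simp only [hc, if_pos rfl]
        cases hfo : rest.findIdx? pvIsOtherHeader with
        | none => simp only [hfo] at ih; simp [ih]
        | some k => simp only [hfo] at ih; simp [ih]
      · rw [if_neg hc] at ih
        simp only [if_neg hc]
        cases hfo : rest.findIdx? pvIsOtherHeader with
        | none => simp only [hfo] at ih; simp [ih]
        | some k => simp only [hfo] at ih; simp [ih]
    · rw [Bool.not_eq_true] at hP
      by_cases hO : pvIsOtherHeader l = true
      · have h1 := pvLoopA_pass safe rest false
        rw [pvStep_other safe rest hP hO hs]
        simp only [List.findIdx?_cons, hO]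
        simp [h1.1, h1.2]
      · rw [Bool.not_eq_true] at hO
        cases rest with
        | nil =>
          rw [pvStep_plain safe [] true false hP hO]
          simp [pvLoopA, hO]
        | cons r0 rs =>
          rw [pvStep_plain safe (r0 :: rs) true false hP hO]
          have hstep : List.findIdx? pvIsOtherHeader (l :: r0 :: rs)
              = Option.map (fun i => i + 1) (List.findIdx? pvIsOtherHeader (r0 :: rs)) := by
            rw [List.findIdx?_cons]; simp [hO]
          rw [hstep]
          simp only [List.isEmpty_cons, Bool.and_false, Bool.false_or, List.nil_append]
          by_cases hc : ((pvLoopA safe (r0 :: rs) true false).2.1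
              && !(pvLoopA safe (r0 :: rs) true false).2.2 && !safe.isEmpty) = true
          · rw [if_pos hc] at ih
            simp only [hc, if_pos rfl]
            cases hfo : (r0 :: rs).findIdx? pvIsOtherHeader with
            | none => simp only [hfo] at ih; simp [ih]
            | some k => simp only [hfo] at ih; simp [ih]
          · rw [if_neg hc] at ih
            simp only [if_neg hc]
            cases hfo : (r0 :: rs).findIdx? pvIsOtherHeader with
            | none => simp only [hfo] at ih; simp [ih]
            | some k => simp only [hfo] at ih; simp [ih]

lemma pvStep_pre (safe : List String) {l : String} (rest : List String) (upd : Bool)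
    (hP : pvIsSkillsHeader l = false) :
    pvLoopA safe (l :: rest) false upd
      = (l :: (pvLoopA safe rest false upd).1, (pvLoopA safe rest false upd).2) := by
  simp [pvLoopA, hP]

lemma pvLoopA_main (safe : List String) (hs : safe.isEmpty = false) : ∀ (ls : List String),
    (if (pvLoopA safe ls false false).2.1 && !(pvLoopA safe ls false false).2.2 && !safe.isEmpty
      then (pvLoopA safe ls false false).1 ++ [pvBullet safe]
      else (pvLoopA safe ls false false).1)
    = match ls.findIdx? pvIsSkillsHeader with
      | none => ls
      | some i =>
        let pos := match (ls.drop (i + 1)).findIdx? pvIsOtherHeader with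
          | none => ls.length
          | some k => i + 1 + k
        ls.take pos ++ pvBullet safe :: ls.drop pos := by
  intro ls
  induction ls with
  | nil => simp [pvLoopA]
  | cons l rest ih =>
    by_cases hP : pvIsSkillsHeader l = true
    · rw [pvStep_skills safe rest false false hP]
      have h2 := pvLoopA_skills safe hs rest
      simp only [List.findIdx?_cons, hP, if_pos rfl]
      by_cases hc : ((pvLoopA safe rest true false).2.1
          && !(pvLoopA safe rest true false).2.2 && !safe.isEmpty) = true
      · rw [if_pos hc] at h2
        simp only [hc, if_pos rfl]
        cases hfo : rest.findIdx? pvIsOtherHeader with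
        | none => simp only [hfo] at h2; simp [hfo, h2, List.take_succ_cons, List.drop_succ_cons]
        | some k => simp only [hfo] at h2
                    have hk : 1 + k = k + 1 := by omega
                    simp [hfo, hk, h2, List.take_succ_cons, List.drop_succ_cons]
      · rw [if_neg hc] at h2
        simp only [if_neg hc]
        cases hfo : rest.findIdx? pvIsOtherHeader with
        | none => simp only [hfo] at h2; simp [hfo, h2, List.take_succ_cons, List.drop_succ_cons]
        | some k => simp only [hfo] at h2
                    have hk : 1 + k = k + 1 := by omega
                    simp [hfo, hk, h2, List.take_succ_cons, List.drop_succ_cons]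
    · rw [Bool.not_eq_true] at hP
      rw [pvStep_pre safe rest false hP]
      have hstep : List.findIdx? pvIsSkillsHeader (l :: rest)
          = Option.map (fun i => i + 1) (List.findIdx? pvIsSkillsHeader rest) := by
        rw [List.findIdx?_cons]; simp [hP]
      rw [hstep]
      by_cases hc : ((pvLoopA safe rest false false).2.1
          && !(pvLoopA safe rest false false).2.2 && !safe.isEmpty) = true
      · rw [if_pos hc] at ih
        simp only [hc, if_pos rfl]
        cases hfi : rest.findIdx? pvIsSkillsHeader with
        | none => simp only [hfi] at ih; simp [ih]
        | some i =>
          simp only [hfi] at ih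
          simp only [Option.map_some]
          rw [List.drop_succ_cons]
          cases hfo : (rest.drop (i + 1)).findIdx? pvIsOtherHeader with
          | none => simp only [hfo] at ih ⊢
                    simp [ih, List.take_succ_cons, List.drop_succ_cons]
          | some k => simp only [hfo] at ih ⊢
                      have : i + 1 + 1 + k = (i + 1 + k) + 1 := by omega
                      simp [this, ih, List.take_succ_cons, List.drop_succ_cons]
      · rw [if_neg hc] at ih
        simp only [if_neg hc]
        cases hfi : rest.findIdx? pvIsSkillsHeader with
        | none => simp only [hfi] at ih; simp [ih]
        | some i =>
          simp only [hfi] at ih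
          simp only [Option.map_some]
          rw [List.drop_succ_cons]
          cases hfo : (rest.drop (i + 1)).findIdx? pvIsOtherHeader with
          | none => simp only [hfo] at ih ⊢
                    simp [ih, List.take_succ_cons, List.drop_succ_cons]
          | some k => simp only [hfo] at ih ⊢
                      have : i + 1 + 1 + k = (i + 1 + k) + 1 := by omega
                      simp [this, ih, List.take_succ_cons, List.drop_succ_cons]


-- ===== VERDICT (by name: the statement is the Claim_ definition above) =====
theorem inject_skills_keywords_py_spec : Claim_equal_inject_skills_keywords_py := by
  intro rest_block missing_keywords _
  unfold Spec_inject_skills_keywords_py inject_skills_keywords_py inject_skills_keywords_py_alt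
  by_cases h1 : (missing_keywords.isEmpty || rest_block == "") = true
  · simp [h1]
  · rw [Bool.not_eq_true] at h1
    simp only [h1, Bool.false_eq_true, if_false]
    by_cases h2 : (pvSafeKeywords missing_keywords).isEmpty = true
    · simp [h2]
    · rw [Bool.not_eq_true] at h2
      simp only [h2, Bool.false_eq_true, if_false]
      have hmain := pvLoopA_main (pvSafeKeywords missing_keywords) h2
        ((PySem.Str.split? rest_block "\n").getD [])
      rw [h2] at hmain
      by_cases hc : ((pvLoopA (pvSafeKeywords missing_keywords)
          ((PySem.Str.split? rest_block "\n").getD []) false false).2.1 &&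
          !(pvLoopA (pvSafeKeywords missing_keywords)
            ((PySem.Str.split? rest_block "\n").getD []) false false).2.2 &&
          !false) = true
      · rw [if_pos hc] at hmain
        rw [if_pos hc, hmain]
        cases hfi : ((PySem.Str.split? rest_block "\n").getD []).findIdx? pvIsSkillsHeader with
        | none => simp [hfi]
        | some i => simp [hfi]
      · rw [if_neg hc] at hmain
        rw [if_neg hc, hmain]
        cases hfi : ((PySem.Str.split? rest_block "\n").getD []).findIdx? pvIsSkillsHeader with
        | none => simp [hfi]
        | some i => simp [hfi]
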